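-- pv_equiv track=rewrite | github.com/wangyang581/uav | src/utils.py | id_in_list_2
-- ===== SOURCE A (Python) =====
-- def id_in_list_2(ids, lists):
--     for i in range(0, len(ids)):
--         a = 0
--         for j in range(0, len(lists)):
--             if ids[i] in lists[j]:
--                 a += 1
--         if a >= 13:
--             return True
--
--     return False
-- ===== SOURCE B (Python) =====
-- def id_in_list_2(ids, lists):
--     counts = {}
--     for sub in lists:
--         for x in set(sub):
--             counts[x] = counts.get(x, 0) + 1
--     return any(counts.get(i, 0) >= 13 for i in ids)
-- ===== Notes on version B (the rewrite author's own statement) =====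
-- stated objective: faster
-- what changed: Instead of rescanning every sublist for every id (nested membership scans), B makes one pass over lists building a frequency table of how many sublists each element occurs in (per-sublist set dedup), then checks ids against the table.
import Mathlib
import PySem

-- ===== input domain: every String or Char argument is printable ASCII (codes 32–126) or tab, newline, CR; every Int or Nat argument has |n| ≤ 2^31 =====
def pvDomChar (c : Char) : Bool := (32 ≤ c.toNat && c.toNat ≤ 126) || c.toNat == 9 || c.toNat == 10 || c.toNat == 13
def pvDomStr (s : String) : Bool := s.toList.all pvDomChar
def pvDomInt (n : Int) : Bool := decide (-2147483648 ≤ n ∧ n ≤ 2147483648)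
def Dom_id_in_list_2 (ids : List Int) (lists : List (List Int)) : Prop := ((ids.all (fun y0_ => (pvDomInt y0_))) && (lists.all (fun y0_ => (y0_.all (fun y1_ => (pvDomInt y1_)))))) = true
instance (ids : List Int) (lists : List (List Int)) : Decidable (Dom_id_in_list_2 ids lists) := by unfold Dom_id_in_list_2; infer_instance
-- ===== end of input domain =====

-- B builds a frequency table (one pass over `lists`, per-sublist set dedup) and then checks `ids`
-- against it, instead of A's nested rescan of every sublist for every id.

-- ===== PORT A =====
def id_in_list_2 (ids : List Int) (lists : List (List Int)) : Bool :=
  match ids with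
  | [] => false
  | x :: rest =>
    -- a = 0; for j in range(len(lists)): if ids[i] in lists[j]: a += 1
    let a : Int := lists.foldl (fun a l => if l.contains x then a + 1 else a) 0
    if 13 ≤ a then true else id_in_list_2 rest lists

-- ===== PORT B =====
def id_in_list_2_alt (ids : List Int) (lists : List (List Int)) : Bool :=
  -- counts = {}; for sub in lists: for x in set(sub): counts[x] = counts.get(x, 0) + 1
  let counts : PySem.Dict Int Int :=
    lists.foldl
      (fun d sub => (PySem.Set.ofList sub).foldl (fun d x => d.modify x 0 (· + 1)) d)
      PySem.Dict.empty
  -- any(counts.get(i, 0) >= 13 for i in ids)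
  ids.any (fun i => 13 ≤ counts.getD i 0)

-- ===== PRECONDITION & SPEC =====
def Spec_id_in_list_2 (ids : List Int) (lists : List (List Int)) (out : Bool) : Prop := out = id_in_list_2_alt ids lists
instance (ids : List Int) (lists : List (List Int)) (out : Bool) : Decidable (Spec_id_in_list_2 ids lists out) := by unfold Spec_id_in_list_2; infer_instance

-- ===== CLAIM (what is proved, stated in full; the proofs are below) =====
def Claim_equal_id_in_list_2 : Prop := ∀ (ids : List Int) (lists : List (List Int)), Dom_id_in_list_2 ids lists → Spec_id_in_list_2 ids lists (id_in_list_2 ids lists)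

-- ===== LEMMAS AND PROOFS =====

-- a Nodup list counts an element once or not at all
theorem count_ofList_eq (l : List Int) (v : Int) :
    (PySem.Set.ofList l).count v = (if l.contains v then 1 else 0) := by
  have hn := PySem.Set.nodup_ofList l
  have hm : v ∈ PySem.Set.ofList l ↔ v ∈ l := PySem.Set.mem_ofList l v
  by_cases h : v ∈ l
  · simp only [List.contains_iff_mem, h, if_pos]
    exact List.count_eq_one_of_mem hn (hm.mpr h)
  · simp only [List.contains_iff_mem, h]
    exact List.count_eq_zero_of_not_mem (fun hv => h (hm.mp hv))

-- the frequency table's entry for v = number of sublists containing v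
theorem counts_getD (lists : List (List Int)) (d : PySem.Dict Int Int) (v : Int) :
    (lists.foldl
      (fun d sub => (PySem.Set.ofList sub).foldl (fun d x => d.modify x 0 (· + 1)) d)
      d).getD v 0
    = d.getD v 0 + (lists.countP (fun l => l.contains v) : Int) := by
  induction lists generalizing d with
  | nil => simp
  | cons sub rest ih =>
    rw [List.foldl_cons, ih, PySem.Dict.getD_foldl_modify_add_one, count_ofList_eq,
        List.countP_cons]
    split_ifs with h
    · push_cast; ring
    · ring

-- A computes the same "any id hits ≥ 13 sublists" test
theorem portA_eq_any (ids : List Int) (lists : List (List Int)) :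
    id_in_list_2 ids lists
    = ids.any (fun x => 13 ≤ (lists.countP (fun l => l.contains x) : Int)) := by
  induction ids with
  | nil => rfl
  | cons x rest ih =>
    rw [id_in_list_2]
    simp only [PySem.List.foldl_if_add_one, Int.zero_add, List.any_cons]
    split_ifs with h
    · rw [decide_eq_true h, Bool.true_or]
    · rw [decide_eq_false h, Bool.false_or, ih]

-- ===== VERDICT (by name: the statement is the Claim_ definition above) =====
theorem id_in_list_2_spec : Claim_equal_id_in_list_2 := by
  intro ids lists _
  unfold Spec_id_in_list_2 id_in_list_2_alt
  rw [portA_eq_any]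
  refine PySem.List.any_congr_mem (fun x _ => ?_)
  rw [counts_getD]
  simp only [PySem.Dict.empty, PySem.Dict.getD, PySem.Dict.get?, List.find?_nil,
    Option.map_none, Option.getD_none]
  rw [decide_eq_decide]
  omega
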